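-- pv_equiv track=rewrite | github.com/shannellemibei/voicemodel | eva.py | check_stop_words
-- ===== SOURCE A (Python) =====
-- STOPWORD = ["bye eva", "stop eva", "sleep eva", "goodbye eva"]
--
-- def check_stop_words(text):
--     """Check if text contains stop words"""
--     text_lower = text.lower()
--
--     # Check for exact stopword matches
--     for stopword in STOPWORD:
--         if stopword in text_lower:
--             return True
--
--     # Check for partial matches (bye + eva, stop + eva, etc.)
--     eva_mentioned = "eva" in text_lower
--     stop_words = ["bye", "stop", "goodbye", "sleep", "quiet", "shut up"]
--
--     if eva_mentioned:
--         for stop_word in stop_words: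
--             if stop_word in text_lower:
--                 return True
--
--     return False
-- ===== SOURCE B (Python) =====
-- def check_stop_words(text):
--     """Check if text contains stop words"""
--     text_lower = text.lower()
--     # Every STOPWORD phrase already contains "eva" and one of these words,
--     # so a single combined condition suffices.
--     return "eva" in text_lower and any(
--         w in text_lower for w in ["bye", "stop", "goodbye", "sleep", "quiet", "shut up"]
--     )
-- ===== Notes on version B (the rewrite author's own statement) =====
-- stated objective: simpler
-- what changed: Drops the whole STOPWORD phrase-scanning pass (each phrase contains both 'eva' and a word from the second list, so it is subsumed) and returns one combined boolean: 'eva' present AND some stop word present.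
import Mathlib
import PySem

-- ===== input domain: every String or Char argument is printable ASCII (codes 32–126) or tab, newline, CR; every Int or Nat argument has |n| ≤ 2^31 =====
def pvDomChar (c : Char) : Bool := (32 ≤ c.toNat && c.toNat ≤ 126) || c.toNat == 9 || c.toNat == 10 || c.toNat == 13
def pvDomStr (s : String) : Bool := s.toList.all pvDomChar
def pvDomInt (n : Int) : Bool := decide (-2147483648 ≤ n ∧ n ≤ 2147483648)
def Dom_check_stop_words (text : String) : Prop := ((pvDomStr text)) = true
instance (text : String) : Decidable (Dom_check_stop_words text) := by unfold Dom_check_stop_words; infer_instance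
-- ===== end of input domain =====

-- B drops the redundant STOPWORD phrase pass (each phrase contains 'eva' and a listed stop word)
-- and returns one combined boolean; objective: simpler.


-- ===== PORT A =====
def STOPWORD : List String := ["bye eva", "stop eva", "sleep eva", "goodbye eva"]

def check_stop_words (text : String) : Bool :=
  let text_lower := PySem.Str.lower text
  -- first pass: 'for stopword in STOPWORD: if stopword in text_lower: return True'
  if STOPWORD.any (fun stopword => PySem.Str.isIn stopword text_lower) then true
  else
    -- second pass
    let eva_mentioned := PySem.Str.isIn "eva" text_lower
    let stop_words : List String := ["bye", "stop", "goodbye", "sleep", "quiet", "shut up"]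
    if eva_mentioned then
      if stop_words.any (fun stop_word => PySem.Str.isIn stop_word text_lower) then true
      else false
    else false

-- ===== PORT B =====
def check_stop_words_alt (text : String) : Bool :=
  let text_lower := PySem.Str.lower text
  PySem.Str.isIn "eva" text_lower &&
    (["bye", "stop", "goodbye", "sleep", "quiet", "shut up"].any
      (fun w => PySem.Str.isIn w text_lower))

-- ===== PRECONDITION & SPEC =====
def Spec_check_stop_words (text : String) (out : Bool) : Prop := out = check_stop_words_alt text
instance (text : String) (out : Bool) : Decidable (Spec_check_stop_words text out) := by unfold Spec_check_stop_words; infer_instance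

-- ===== CLAIM (what is proved, stated in full; the proofs are below) =====
def Claim_equal_check_stop_words : Prop := ∀ (text : String), Dom_check_stop_words text → Spec_check_stop_words text (check_stop_words text)

-- ===== LEMMAS AND PROOFS =====

-- if 'p in t' and s is a substring of p, then 's in t' (substring containment is transitive)
theorem str_isIn_of_infix (p t s : String) (hs : s.toList <:+: p.toList)
    (h : PySem.Str.isIn p t = true) : PySem.Str.isIn s t = true := by
  rw [PySem.Str.isIn_iff_infix] at h ⊢
  exact hs.trans h

-- ===== VERDICT (by name: the statement is the Claim_ definition above) =====
theorem check_stop_words_spec : Claim_equal_check_stop_words := by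
  intro text _
  unfold Spec_check_stop_words check_stop_words check_stop_words_alt STOPWORD
  simp only [List.any_cons, List.any_nil, Bool.or_false]
  split_ifs with hP hE hW
  · -- a phrase matched: both 'eva' and the corresponding word are substrings
    simp only [Bool.or_eq_true] at hP
    rcases hP with h | h | h | h
    · rw [str_isIn_of_infix _ _ "eva" (by decide) h,
        str_isIn_of_infix _ _ "bye" (by decide) h]
      simp
    · rw [str_isIn_of_infix _ _ "eva" (by decide) h,
        str_isIn_of_infix _ _ "stop" (by decide) h]
      simp
    · rw [str_isIn_of_infix _ _ "eva" (by decide) h,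
        str_isIn_of_infix _ _ "sleep" (by decide) h]
      simp
    · rw [str_isIn_of_infix _ _ "eva" (by decide) h,
        str_isIn_of_infix _ _ "goodbye" (by decide) h]
      simp
  · -- no phrase, 'eva' present, a word present
    rw [hE, hW]
    rfl
  · -- no phrase, 'eva' present, no word: both sides false
    rw [hE, Bool.true_and]
    exact ((Bool.not_eq_true _).mp hW).symm
  · -- 'eva' absent: both sides false
    rw [Bool.eq_false_iff.mpr hE, Bool.false_and]
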